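-- pv_equiv track=rewrite | github.com/balansky/sigmoid_neuron | nn.py | generate_layer_structure
-- ===== SOURCE A (Python) =====
-- def generate_layer_structure(input_shape, hidden_shape, output_shape):
--     layers = []
--     input_layer = (hidden_shape[0],input_shape + 1)
--     layers.append(input_layer)
--     for i in range(1, len(hidden_shape)):
--         layers.append((hidden_shape[i], layers[i-1][0] + 1))
--     layers.append((output_shape, layers[-1][0] + 1))
--     return layers
-- ===== SOURCE B (Python) =====
-- def generate_layer_structure(input_shape, hidden_shape, output_shape):
--     rev = [(output_shape, hidden_shape[-1] + 1)]
--     prev = list(hidden_shape)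
--     while len(prev) > 1:
--         s = prev.pop()
--         rev.append((s, prev[-1] + 1))
--     rev.append((prev[0], input_shape + 1))
--     rev.reverse()
--     return rev
-- ===== Notes on version B (the rewrite author's own statement) =====
-- stated objective: alternative
-- what changed: Builds the layer list back-to-front: starts from the output layer, pops hidden sizes off the end of a working copy pairing each with the new last element, appends the input layer last and reverses, instead of A's forward loop that appends while indexing back into the growing accumulator.
import Mathlib
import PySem

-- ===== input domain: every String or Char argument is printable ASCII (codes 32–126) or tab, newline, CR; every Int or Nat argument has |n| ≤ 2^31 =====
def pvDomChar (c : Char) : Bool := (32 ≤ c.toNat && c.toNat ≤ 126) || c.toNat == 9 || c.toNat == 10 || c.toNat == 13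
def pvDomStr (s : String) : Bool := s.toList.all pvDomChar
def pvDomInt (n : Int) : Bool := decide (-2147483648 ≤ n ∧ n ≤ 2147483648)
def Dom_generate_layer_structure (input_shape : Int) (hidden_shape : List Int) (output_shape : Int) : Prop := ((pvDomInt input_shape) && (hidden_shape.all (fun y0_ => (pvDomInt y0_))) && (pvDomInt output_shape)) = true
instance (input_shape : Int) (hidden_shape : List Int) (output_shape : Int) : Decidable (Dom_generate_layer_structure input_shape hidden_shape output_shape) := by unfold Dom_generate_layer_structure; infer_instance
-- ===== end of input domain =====

-- B builds the layer list back-to-front (pop loop from the output layer, then reverse)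
-- instead of A's forward loop indexing back into the growing accumulator (alternative).

-- ===== PORT A =====
def generate_layer_structure (input_shape : Int) (hidden_shape : List Int) (output_shape : Int) : List (Int × Int) :=
  match PySem.List.pyGet? hidden_shape 0 with
  | none => []  -- Python raises IndexError here (hidden_shape = []); excluded by Pre_
  | some h0 =>
    let layers : List (Int × Int) := [(h0, input_shape + 1)]
    let layers := (PySem.List.pyRange 1 (hidden_shape.length : Int) 1).foldl
      (fun ls i => ls ++ [(PySem.List.pyGetD hidden_shape i 0,
                           (PySem.List.pyGetD ls (i - 1) (0, 0)).1 + 1)]) layers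
    layers ++ [(output_shape, (PySem.List.pyGetD layers (-1) (0, 0)).1 + 1)]

-- ===== PORT B =====
-- the while loop of Source B: pops the last element of prev while len(prev) > 1
-- (prev.pop() ported by hand as getLast/dropLast, exact since 1 < prev.length)
def altWhile (rev : List (Int × Int)) (prev : List Int) : List (Int × Int) × List Int :=
  if h : 1 < prev.length then
    let s := prev.getLast (by intro hc; rw [hc] at h; simp at h)
    let prev' := prev.dropLast
    altWhile (rev ++ [(s, PySem.List.pyGetD prev' (-1) 0 + 1)]) prev'
  else (rev, prev)
termination_by prev.length
decreasing_by simp only [List.length_dropLast]; omega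

def generate_layer_structure_alt (input_shape : Int) (hidden_shape : List Int) (output_shape : Int) : List (Int × Int) :=
  match PySem.List.pyGet? hidden_shape (-1) with
  | none => []  -- Python raises IndexError here (hidden_shape = []); excluded by Pre_
  | some hl =>
    let r := altWhile [(output_shape, hl + 1)] hidden_shape
    (r.1 ++ [(PySem.List.pyGetD r.2 0 0, input_shape + 1)]).reverse

-- ===== PRECONDITION & SPEC =====
-- Pre_ excludes exactly the empty hidden_shape, on which A raises IndexError.
def Pre_generate_layer_structure (input_shape : Int) (hidden_shape : List Int) (output_shape : Int) : Prop :=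
  hidden_shape ≠ []
instance (input_shape : Int) (hidden_shape : List Int) (output_shape : Int) : Decidable (Pre_generate_layer_structure input_shape hidden_shape output_shape) := by unfold Pre_generate_layer_structure; infer_instance

def pvWitness_generate_layer_structure : Int × List Int × Int := (3, [4, 5], 2)

def Spec_generate_layer_structure (input_shape : Int) (hidden_shape : List Int) (output_shape : Int) (out : List (Int × Int)) : Prop := out = generate_layer_structure_alt input_shape hidden_shape output_shape
instance (input_shape : Int) (hidden_shape : List Int) (output_shape : Int) (out : List (Int × Int)) : Decidable (Spec_generate_layer_structure input_shape hidden_shape output_shape out) := by unfold Spec_generate_layer_structure; infer_instance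

-- ===== CLAIM (what is proved, stated in full; the proofs are below) =====
def Claim_equal_generate_layer_structure : Prop := ∀ (input_shape : Int) (hidden_shape : List Int) (output_shape : Int), Dom_generate_layer_structure input_shape hidden_shape output_shape → Pre_generate_layer_structure input_shape hidden_shape output_shape → Spec_generate_layer_structure input_shape hidden_shape output_shape (generate_layer_structure input_shape hidden_shape output_shape)

-- ===== LEMMAS AND PROOFS =====

-- proof-only helper: the hidden-layer prefix both programs compute
def tgt (i : Int) : List Int → List (Int × Int)
  | [] => []
  | a :: t => (a, i + 1) :: tgt a t

theorem tgt_length (i : Int) (h : List Int) : (tgt i h).length = h.length := by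
  induction h generalizing i with
  | nil => rfl
  | cons a t ih => simp [tgt, ih]

theorem tgt_getD (h : List Int) (i : Int) (n : Nat) (hn : n < h.length) :
    (tgt i h).getD n (0, 0) = (h.getD n 0, (i :: h).getD n 0 + 1) := by
  induction h generalizing i n with
  | nil => simp at hn
  | cons a t ih =>
    cases n with
    | zero => simp [tgt]
    | succ m =>
      simp only [tgt, List.getD_cons_succ]
      have := ih a m (by simpa using hn)
      simpa using this

theorem tgt_last_fst (t : List Int) (h0 i : Int) (d : Int × Int) :
    ((tgt i (h0 :: t)).getLastD d).1 = t.getLastD h0 := by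
  induction t generalizing i h0 d with
  | nil => simp [tgt]
  | cons a t' ih =>
    show (((h0, i + 1) :: tgt h0 (a :: t')).getLastD d).1 = (a :: t').getLastD h0
    rw [List.getLastD_cons, List.getLastD_cons]
    exact ih a h0 _

-- proof-only helper: the pairs the while loop appends, in append order
def revTail (prev : List Int) : List (Int × Int) :=
  if h : 1 < prev.length then
    (prev.getLast (by intro hc; rw [hc] at h; simp at h),
     prev.dropLast.getLastD 0 + 1) :: revTail prev.dropLast
  else []
termination_by prev.length
decreasing_by simp only [List.length_dropLast]; omega

theorem altWhile_eq (prev : List (Int)) (rev : List (Int × Int)) :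
    altWhile rev prev = (rev ++ revTail prev, prev.take 1) := by
  fun_induction altWhile rev prev with
  | case1 rev prev h s prev' ih =>
    have hne : prev.dropLast ≠ [] := by
      have hl : prev.dropLast.length = prev.length - 1 := List.length_dropLast
      intro hc; rw [hc] at hl; simp at hl; omega
    rw [revTail]
    rw [dif_pos h]
    have hpy : PySem.List.pyGetD prev.dropLast (-1) 0 = prev.dropLast.getLastD 0 := by
      rw [PySem.List.pyGetD_neg_one _ _ hne, List.getLastD_eq_getLast?,
        List.getLast?_eq_some_getLast hne]
      rfl
    have htake : prev.dropLast.take 1 = prev.take 1 := by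
      rw [List.dropLast_eq_take, List.take_take]
      congr 1
      omega
    rw [ih]
    refine Prod.ext ?_ htake
    show rev ++ [_] ++ revTail prev' = rev ++ _ :: revTail prev.dropLast
    rw [hpy]
    simp
    exact ⟨rfl, rfl⟩
  | case2 rev prev h =>
    rw [revTail, dif_neg h]
    rcases prev with _ | ⟨a, t⟩
    · simp
    · simp at h
      subst h
      simp

theorem revTail_concat (xs : List Int) (s : Int) (hne : xs ≠ []) :
    revTail (xs ++ [s]) = (s, xs.getLastD 0 + 1) :: revTail xs := by
  have hlen : 1 < (xs ++ [s]).length := by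
    rcases xs with _ | ⟨a, t⟩
    · exact absurd rfl hne
    · simp
  rw [revTail, dif_pos hlen]
  simp [List.getLastD_eq_getLast?]

theorem tgt_concat (i : Int) (xs : List Int) (s : Int) :
    tgt i (xs ++ [s]) = tgt i xs ++ [(s, (i :: xs).getLastD 0 + 1)] := by
  induction xs generalizing i with
  | nil => simp [tgt]
  | cons a t ih =>
    simp only [List.cons_append, tgt, ih a, List.getLastD_cons]

theorem rev_revTail (t : List Int) (h0 : Int) :
    (revTail (h0 :: t)).reverse = tgt h0 t := by
  induction t using List.reverseRecOn with
  | nil =>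
    rw [revTail]
    simp [tgt]
  | append_singleton t' s ih =>
    rw [show h0 :: (t' ++ [s]) = (h0 :: t') ++ [s] by simp,
      revTail_concat _ _ (by simp), tgt_concat]
    simp [ih]

theorem alt_eq_tgt (h : List Int) (i o : Int) (hne : h ≠ []) :
    generate_layer_structure_alt i h o = tgt i h ++ [(o, h.getLastD i + 1)] := by
  rcases h with _ | ⟨h0, t⟩
  · exact absurd rfl hne
  have hget : PySem.List.pyGet? (h0 :: t) (-1) = some ((h0 :: t).getLast (by simp)) := by
    rw [PySem.List.pyGet?_neg_one, List.getLast?_eq_some_getLast (by simp)]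
  unfold generate_layer_structure_alt
  rw [hget]
  simp only []
  rw [altWhile_eq]
  have htake : (h0 :: t).take 1 = [h0] := by simp
  rw [htake]
  have h0get : PySem.List.pyGetD [h0] 0 0 = h0 := by
    simp [PySem.List.pyGetD_zero]
  rw [h0get]
  simp only [List.reverse_append, List.reverse_cons, List.reverse_nil, List.nil_append,
    List.append_assoc]
  rw [rev_revTail]
  have hlast : (h0 :: t).getLast (by simp) = t.getLastD h0 := by
    rw [List.getLastD_eq_getLast?]
    rcases t with _ | ⟨a, u⟩
    · simp [List.getLast]
    · rw [List.getLast_cons (by simp), List.getLast?_eq_some_getLast (by simp : (a :: u) ≠ [])]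
      rfl
  rw [hlast]
  show (h0, i + 1) :: (tgt h0 t ++ [(o, t.getLastD h0 + 1)]) = tgt i (h0 :: t) ++ [(o, (h0 :: t).getLastD i + 1)]
  simp only [tgt, List.cons_append]
  rcases t with _ | ⟨a, u⟩
  · simp
  · simp
    rw [List.getLast?_eq_some_getLast (by simp : (a :: u) ≠ [])]
    simp

theorem loop_inv (h0 : Int) (t : List Int) (i : Int) (n : Nat) (hn : n ≤ t.length) :
    (PySem.List.pyRange 1 (1 + (n : Int)) 1).foldl
      (fun ls j => ls ++ [(PySem.List.pyGetD (h0 :: t) j 0,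
                           (PySem.List.pyGetD ls (j - 1) (0, 0)).1 + 1)])
      [(h0, i + 1)]
    = (tgt i (h0 :: t)).take (n + 1) := by
  induction n with
  | zero =>
    rw [PySem.List.pyRange_one_eq_nil (by norm_num)]
    simp [tgt]
  | succ m ih =>
    have hm : m ≤ t.length := by omega
    have hcast : (1 : Int) + ((m + 1 : Nat) : Int) = (1 + (m : Int)) + 1 := by push_cast; ring
    rw [hcast, PySem.List.pyRange_one_succ_right (by omega), List.foldl_append, ih hm]
    simp only [List.foldl_cons, List.foldl_nil]
    have hlen : (tgt i (h0 :: t)).length = t.length + 1 := by simp [tgt_length]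
    have hidx : (1 : Int) + (m : Int) = ((m + 1 : Nat) : Int) := by push_cast; ring
    have h1 : PySem.List.pyGetD (h0 :: t) (1 + (m : Int)) 0 = (h0 :: t).getD (m + 1) 0 := by
      rw [hidx, PySem.List.pyGetD_natCast]
    have h2 : PySem.List.pyGetD ((tgt i (h0 :: t)).take (m + 1)) (1 + (m : Int) - 1) (0, 0)
        = (tgt i (h0 :: t)).getD m (0, 0) := by
      have hm' : (1 : Int) + (m : Int) - 1 = ((m : Nat) : Int) := by ring
      rw [hm', PySem.List.pyGetD_natCast]
      unfold List.getD
      rw [List.getElem?_take_of_lt (by omega)]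
    rw [h1, h2, tgt_getD _ _ _ (by simp; omega)]
    have hlt2 : m + 1 < (tgt i (h0 :: t)).length := by omega
    conv_rhs => rw [List.take_add_one]
    rw [List.getElem?_eq_getElem hlt2]
    have hgd : (tgt i (h0 :: t))[m + 1] = (tgt i (h0 :: t)).getD (m + 1) (0, 0) :=
      (List.getD_eq_getElem _ _ hlt2).symm
    rw [hgd, tgt_getD _ _ _ (by simp; omega)]
    simp

theorem a_eq_alt (i : Int) (h : List Int) (o : Int) (hne : h ≠ []) :
    generate_layer_structure i h o = generate_layer_structure_alt i h o := by
  cases h with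
  | nil => exact absurd rfl hne
  | cons h0 t =>
    have hget : PySem.List.pyGet? (h0 :: t) 0 = some h0 := by
      simp [PySem.List.pyGet?, PySem.List.pyIdx?]
    unfold generate_layer_structure
    rw [hget]
    simp only []
    have hlenc : (((h0 :: t).length : Nat) : Int) = 1 + (t.length : Int) := by
      simp [List.length_cons]; ring
    rw [hlenc, loop_inv h0 t i t.length (le_refl _)]
    have hlen : (tgt i (h0 :: t)).length = t.length + 1 := by simp [tgt_length]
    rw [List.take_of_length_le (by omega)]
    have hne' : tgt i (h0 :: t) ≠ [] := by
      intro hcon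
      have := hlen
      rw [hcon] at this
      simp at this
    rw [PySem.List.pyGetD_neg_one _ (0, 0) hne']
    have hgl : (tgt i (h0 :: t)).getLast hne' = (tgt i (h0 :: t)).getLastD (0, 0) := by
      rw [List.getLastD_eq_getLast?, List.getLast?_eq_some_getLast hne']
      rfl
    rw [hgl, tgt_last_fst, alt_eq_tgt _ _ _ (by simp), List.getLastD_cons]

-- ===== VERDICT (by name: the statement is the Claim_ definition above) =====
theorem generate_layer_structure_spec : Claim_equal_generate_layer_structure := by
  intro i h o _ hpre
  unfold Spec_generate_layer_structure
  exact a_eq_alt i h o hpre
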